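-- pv_equiv track=rewrite | github.com/Daria2002/AoC2021 | src/day04.py | get_all_matrices
-- ===== SOURCE A (Python) =====
-- def get_all_matrices(rows):
--     matrix_arr = []
--     tmp_matrix = []
--     for i in range(2, len(rows)):
--         if rows[i] == '':
--             matrix_arr.append(tmp_matrix)
--             tmp_matrix = []
--             continue
--         elements = rows[i].split(' ')
--         matrix_row = []
--         for el in elements:
--             if el != '':
--                 matrix_row.append(int(el))
--         tmp_matrix.append(matrix_row)
--     matrix_arr.append(tmp_matrix)
--     return matrix_arr
-- ===== SOURCE B (Python) =====
-- def get_all_matrices(rows):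
--     def parse(row):
--         return [int(t) for t in row.split(' ') if t != '']
--
--     def split_segs(body):
--         # recursive split on '' delimiters, building segments back-to-front
--         if not body:
--             return [[]]
--         head, rest = body[0], body[1:]
--         segs = split_segs(rest)
--         if head == '':
--             return [[]] + segs
--         return [[head] + segs[0]] + segs[1:]
--
--     return [[parse(r) for r in seg] for seg in split_segs(rows[2:])]
-- ===== Notes on version B (the rewrite author's own statement) =====
-- stated objective: alternative
-- what changed: A grows matrices with a left-to-right loop carrying matrix_arr/tmp_matrix accumulators and flushing on each '' row; B first splits rows[2:] into segments by recursion on the list (building segments back-to-front, no accumulator state) and then maps a comprehension-based row parser over each segment.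
import Mathlib
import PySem

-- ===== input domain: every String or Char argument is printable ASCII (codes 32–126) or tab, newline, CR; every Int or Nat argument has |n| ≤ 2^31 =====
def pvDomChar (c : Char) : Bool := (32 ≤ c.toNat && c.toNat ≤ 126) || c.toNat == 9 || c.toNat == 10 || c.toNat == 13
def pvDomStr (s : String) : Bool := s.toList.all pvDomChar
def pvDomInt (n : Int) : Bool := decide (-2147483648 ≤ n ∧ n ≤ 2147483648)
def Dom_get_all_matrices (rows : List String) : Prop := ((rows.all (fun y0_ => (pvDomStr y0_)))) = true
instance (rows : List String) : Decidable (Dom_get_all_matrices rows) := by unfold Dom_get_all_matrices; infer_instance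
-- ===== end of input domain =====

-- B re-decomposes A's accumulator loop as split-into-segments (recursion, back-to-front) then map-parse; same cost, different structure.

-- ===== PORT A =====
-- inner loop: for el in elements: if el != '': matrix_row.append(int(el))
def pvParseRowA (row : String) : List Int :=
  ((PySem.Str.split? row " ").getD []).foldl
    (fun matrix_row el =>
      if el ≠ "" then matrix_row ++ [(PySem.Int.ofStr? el).getD 0] else matrix_row) []

-- for i in range(2, len(rows)) with state (matrix_arr, tmp_matrix); final flush append
def get_all_matrices (rows : List String) : List (List (List Int)) :=
  let st := (PySem.List.pyRange 2 rows.length 1).foldl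
    (fun (st : List (List (List Int)) × List (List Int)) i =>
      if PySem.List.pyGetD rows i "" = "" then (st.1 ++ [st.2], [])
      else (st.1, st.2 ++ [pvParseRowA (PySem.List.pyGetD rows i "")])) ([], [])
  st.1 ++ [st.2]

-- ===== PORT B =====
def pvParseRowB (row : String) : List Int :=
  (((PySem.Str.split? row " ").getD []).filter (fun t => t ≠ "")).map
    (fun t => (PySem.Int.ofStr? t).getD 0)

-- split_segs: recursion on the list of rows, segments assembled back-to-front
def pvSplitSegs : List String → List (List String)
  | [] => [[]]
  | head :: rest =>
    let segs := pvSplitSegs rest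
    if head = "" then [] :: segs
    else (head :: segs.headD []) :: segs.tail

def get_all_matrices_alt (rows : List String) : List (List (List Int)) :=
  (pvSplitSegs (PySem.List.slice rows (some 2) none)).map (fun seg => seg.map pvParseRowB)

-- ===== PRECONDITION & SPEC =====
-- Pre_ excludes exactly the inputs where Python's int() raises ValueError on some nonempty token of a data row.
def Pre_get_all_matrices (rows : List String) : Prop :=
  ∀ r ∈ rows.drop 2, r ≠ "" →
    ∀ t ∈ (PySem.Str.split? r " ").getD [], t ≠ "" → (PySem.Int.ofStr? t).isSome = true
instance (rows : List String) : Decidable (Pre_get_all_matrices rows) := by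
  unfold Pre_get_all_matrices; infer_instance

def pvWitness_get_all_matrices : List String :=
  ["7,4", "", "1 2", "3  4", "", "5 6"]

def Spec_get_all_matrices (rows : List String) (out : List (List (List Int))) : Prop := out = get_all_matrices_alt rows
instance (rows : List String) (out : List (List (List Int))) : Decidable (Spec_get_all_matrices rows out) := by unfold Spec_get_all_matrices; infer_instance

-- ===== CLAIM (what is proved, stated in full; the proofs are below) =====
def Claim_equal_get_all_matrices : Prop := ∀ (rows : List String), Dom_get_all_matrices rows → Pre_get_all_matrices rows → Spec_get_all_matrices rows (get_all_matrices rows)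

-- ===== LEMMAS AND PROOFS =====

theorem pv_foldl_filter_map {α β : Type} (g : α → β) (p : α → Prop) [DecidablePred p]
    (l : List α) (acc : List β) :
    l.foldl (fun a el => if p el then a ++ [g el] else a) acc
      = acc ++ (l.filter (fun t => p t)).map g := by
  induction l generalizing acc with
  | nil => simp
  | cons x xs ih =>
    by_cases hx : p x <;> simp [hx, ih]

theorem pvParseRow_eq (row : String) : pvParseRowA row = pvParseRowB row := by
  unfold pvParseRowA pvParseRowB
  rw [pv_foldl_filter_map (fun t => (PySem.Int.ofStr? t).getD 0) (fun t => t ≠ "")]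
  simp

theorem pvSplitSegs_ne_nil (body : List String) : pvSplitSegs body ≠ [] := by
  cases body with
  | nil => simp [pvSplitSegs]
  | cons h t => unfold pvSplitSegs; by_cases hh : h = "" <;> simp [hh]

def pvFlush (st : List (List (List Int)) × List (List Int)) : List (List (List Int)) :=
  st.1 ++ [st.2]

-- main invariant: A's accumulator fold equals B's segment decomposition
theorem pv_loop_eq (body : List String) (arr : List (List (List Int))) (tmp : List (List Int)) :
    pvFlush (body.foldl (fun (st : List (List (List Int)) × List (List Int)) r =>
        if r = "" then (st.1 ++ [st.2], []) else (st.1, st.2 ++ [pvParseRowA r])) (arr, tmp))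
    = arr ++ (tmp ++ ((pvSplitSegs body).headD []).map pvParseRowB)
        :: ((pvSplitSegs body).tail.map (fun seg => seg.map pvParseRowB)) := by
  induction body generalizing arr tmp with
  | nil => simp [pvSplitSegs, pvFlush]
  | cons r rest ih =>
    rw [List.foldl_cons]
    obtain ⟨s, ss, hss⟩ : ∃ s ss, pvSplitSegs rest = s :: ss := by
      cases h : pvSplitSegs rest with
      | nil => exact absurd h (pvSplitSegs_ne_nil rest)
      | cons s ss => exact ⟨s, ss, rfl⟩
    by_cases hr : r = ""
    · rw [if_pos hr, ih]
      simp [pvSplitSegs, hr, hss]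
    · rw [if_neg hr, ih]
      simp [pvSplitSegs, hr, hss, pvParseRow_eq]

-- ===== VERDICT (by name: the statement is the Claim_ definition above) =====
theorem get_all_matrices_spec : Claim_equal_get_all_matrices := by
  intro rows _ _
  unfold Spec_get_all_matrices get_all_matrices get_all_matrices_alt
  rw [PySem.List.slice_from rows (show (0:Int) ≤ 2 by omega)]
  have hfold := PySem.List.foldl_pyRange_pyGetD' rows ""
    (fun (st : List (List (List Int)) × List (List Int)) r =>
      if r = "" then (st.1 ++ [st.2], []) else (st.1, st.2 ++ [pvParseRowA r]))
    (([], [])) (show (0:Int) ≤ 2 by omega)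
  show pvFlush _ = _
  rw [hfold, pv_loop_eq]
  obtain ⟨s, ss, hss⟩ : ∃ s ss, pvSplitSegs (rows.drop 2) = s :: ss := by
    cases h : pvSplitSegs (rows.drop 2) with
    | nil => exact absurd h (pvSplitSegs_ne_nil _)
    | cons s ss => exact ⟨s, ss, rfl⟩
  simp [hss]
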